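-- pv_equiv track=rewrite | github.com/BVSTSirop/PokemonGames | services/pokemon.py | _filter_ids_by_gen
-- ===== SOURCE A (Python) =====
-- GEN_ID_RANGES = {
--     '1': (1, 151),
--     '2': (152, 251),
--     '3': (252, 386),
--     '4': (387, 493),
--     '5': (494, 649),
--     '6': (650, 721),
--     '7': (722, 809),
--     '8': (810, 905),
--     '9': (906, 1025),  # update if new gens are added
-- }
--
-- def _filter_ids_by_gen(ids, gen: str):
--     """Return subset of ids restricted to the given generation(s).
--     - Accepts 'all', '', None -> no filtering.
--     - Accepts single gen like '3'.
--     - Accepts CSV like '1,3,5' (order and spaces ignored).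
--     If no valid gens are recognized, return the original ids.
--     """
--     if not gen:
--         return ids
--     g = str(gen).lower().strip()
--     if not g or g in {'all', 'any', '0'}:
--         return ids
--     # Parse CSV of gens
--     gens = [s.strip() for s in g.replace('|', ',').split(',') if s.strip()]
--     ranges = [GEN_ID_RANGES.get(s) for s in gens]
--     ranges = [r for r in ranges if r]
--     if not ranges:
--         return ids
--     allowed = set()
--     for lo, hi in ranges:
--         for i in ids:
--             if lo <= i <= hi:
--                 allowed.add(i)
--     if not allowed:
--         return ids
--     return [i for i in ids if i in allowed]
-- ===== SOURCE B (Python) =====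
-- GEN_ID_RANGES = {
--     '1': (1, 151),
--     '2': (152, 251),
--     '3': (252, 386),
--     '4': (387, 493),
--     '5': (494, 649),
--     '6': (650, 721),
--     '7': (722, 809),
--     '8': (810, 905),
--     '9': (906, 1025),
-- }
--
-- _STARTS = [1, 152, 252, 387, 494, 650, 722, 810, 906]
-- _ENDS = [151, 251, 386, 493, 649, 721, 809, 905, 1025]
--
-- def _gen_of(i):
--     """Binary search for the generation whose id range contains i (None if none)."""
--     lo, hi = 0, 9
--     while lo < hi:
--         mid = (lo + hi) // 2
--         if _STARTS[mid] <= i: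
--             lo = mid + 1
--         else:
--             hi = mid
--     if lo == 0 or i > _ENDS[lo - 1]:
--         return None
--     return str(lo)
--
-- def _filter_ids_by_gen(ids, gen: str):
--     """Map each id to its generation by binary search over the range boundaries,
--     then keep ids whose generation key is in the selected set."""
--     if not gen:
--         return ids
--     g = str(gen).lower().strip()
--     if not g or g in {'all', 'any', '0'}:
--         return ids
--     selected = {s.strip() for s in g.replace('|', ',').split(',')} & set(GEN_ID_RANGES)
--     if not selected:
--         return ids
--     result = [i for i in ids if _gen_of(i) in selected]
--     return result or ids
-- ===== Notes on version B (the rewrite author's own statement) =====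
-- stated objective: alternative
-- what changed: Instead of A's nested loop collecting an 'allowed' id set over ranges x ids and re-filtering, B maps each id to its generation key with a hand-written binary search over the range boundaries and keeps ids whose key lies in the selected gen set (computed as stripped-token set intersected with the dict's keys), with the same empty-result fallback.
import Mathlib
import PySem

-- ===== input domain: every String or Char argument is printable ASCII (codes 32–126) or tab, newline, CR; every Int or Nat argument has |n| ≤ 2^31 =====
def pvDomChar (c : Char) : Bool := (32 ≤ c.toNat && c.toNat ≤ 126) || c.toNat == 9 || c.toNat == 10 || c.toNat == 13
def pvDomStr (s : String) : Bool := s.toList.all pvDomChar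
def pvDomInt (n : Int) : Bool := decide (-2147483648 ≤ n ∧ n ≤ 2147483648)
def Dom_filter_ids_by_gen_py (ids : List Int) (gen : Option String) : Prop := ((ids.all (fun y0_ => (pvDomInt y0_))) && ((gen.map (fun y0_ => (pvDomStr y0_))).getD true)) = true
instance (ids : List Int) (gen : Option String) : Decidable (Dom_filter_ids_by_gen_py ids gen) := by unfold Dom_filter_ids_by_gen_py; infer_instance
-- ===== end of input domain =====

-- B maps each id to its generation by binary search over the range boundaries and tests key membership in the selected gen set, instead of A's nested allowed-set build over ranges×ids (alternative algorithm; same observable value).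


-- ===== PORT A =====
-- module constant GEN_ID_RANGES (used by both Pythons)
def pvGenRanges : PySem.Dict String (Int × Int) :=
  PySem.Dict.ofList [("1", (1, 151)), ("2", (152, 251)), ("3", (252, 386)),
    ("4", (387, 493)), ("5", (494, 649)), ("6", (650, 721)),
    ("7", (722, 809)), ("8", (810, 905)), ("9", (906, 1025))]

-- g.replace('|', ',').split(','): split with a non-empty separator always succeeds, so .getD [] is exact
def pvSplit (g : String) : List String :=
  (PySem.Str.split? (PySem.Str.replace g "|" ",") ",").getD []

-- A's CSV parse: gens = [s.strip() for s in …split(',') if s.strip()]; ranges = recognized ranges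
def pvParseRanges (g : String) : List (Int × Int) :=
  let gens := ((pvSplit g).map PySem.Str.strip).filter (fun s => s ≠ "")
  ((gens.map (fun s => pvGenRanges.get? s)).filterMap id)

def filter_ids_by_gen_py (ids : List Int) (gen : Option String) : List Int :=
  match gen with
  | none => ids
  | some gs =>
    if gs = "" then ids else
    let g := PySem.Str.strip (PySem.Str.lower gs)
    if g = "" ∨ g = "all" ∨ g = "any" ∨ g = "0" then ids else
    let ranges := pvParseRanges g
    if ranges = [] then ids else
    let allowed : PySem.Set Int :=
      ranges.foldl (fun acc r =>
        ids.foldl (fun acc i =>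
          if r.1 ≤ i ∧ i ≤ r.2 then PySem.Set.add acc i else acc) acc) PySem.Set.empty
    if allowed = [] then ids else
    ids.filter (fun i => PySem.Set.contains allowed i)

-- ===== PORT B =====
-- B's module constants _STARTS and _ENDS
def pvStarts : List Int := [1, 152, 252, 387, 494, 650, 722, 810, 906]
def pvEnds : List Int := [151, 251, 386, 493, 649, 721, 809, 905, 1025]

-- the while-loop of _gen_of; fuel 16 only bounds the iterations (the loop halves hi-lo ≤ 9, so ≤ 9 suffice);
-- the index mid always lies in 0..8, so (pyGet? …).getD 0 is exact there
def pvBsLoop : Nat → Int → Int → Int → Int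
  | 0, lo, _, _ => lo
  | fuel+1, lo, hi, i =>
    if lo < hi then
      let mid := PySem.Int.floordiv (lo + hi) 2
      if (PySem.List.pyGet? pvStarts mid).getD 0 ≤ i then pvBsLoop fuel (mid+1) hi i
      else pvBsLoop fuel lo mid i
    else lo

-- _gen_of(i): binary search, then boundary check; lo-1 is in 0..8 whenever it is read
def pvGenOf (i : Int) : Option String :=
  let lo := pvBsLoop 16 0 9 i
  if lo = 0 ∨ (PySem.List.pyGet? pvEnds (lo - 1)).getD 0 < i then none
  else some (PySem.Int.toStr lo)

def filter_ids_by_gen_py_alt (ids : List Int) (gen : Option String) : List Int :=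
  match gen with
  | none => ids
  | some gs =>
    if gs = "" then ids else
    let g := PySem.Str.strip (PySem.Str.lower gs)
    if g = "" ∨ g = "all" ∨ g = "any" ∨ g = "0" then ids else
    let selected : PySem.Set String :=
      PySem.Set.inter (PySem.Set.ofList ((pvSplit g).map PySem.Str.strip))
        (PySem.Set.ofList (PySem.Dict.keys pvGenRanges))
    if selected = [] then ids else
    let result := ids.filter (fun i =>
      match pvGenOf i with
      | none => false
      | some s => PySem.Set.contains selected s)
    if result = [] then ids else result

-- ===== PRECONDITION & SPEC =====
def Spec_filter_ids_by_gen_py (ids : List Int) (gen : Option String) (out : List Int) : Prop := out = filter_ids_by_gen_py_alt ids gen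
instance (ids : List Int) (gen : Option String) (out : List Int) : Decidable (Spec_filter_ids_by_gen_py ids gen out) := by unfold Spec_filter_ids_by_gen_py; infer_instance

-- ===== CLAIM (what is proved, stated in full; the proofs are below) =====
def Claim_equal_filter_ids_by_gen_py : Prop := ∀ (ids : List Int) (gen : Option String), Dom_filter_ids_by_gen_py ids gen → Spec_filter_ids_by_gen_py ids gen (filter_ids_by_gen_py ids gen)

-- ===== LEMMAS AND PROOFS =====

-- one unfolding step of the binary-search loop, with the midpoint and probed start value supplied as literals
theorem bs_step (f : Nat) (lo hi i m s : Int) (hlt : lo < hi)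
    (hm : PySem.Int.floordiv (lo + hi) 2 = m)
    (hs : (PySem.List.pyGet? pvStarts m).getD 0 = s) :
    pvBsLoop (f + 1) lo hi i = if s ≤ i then pvBsLoop f (m + 1) hi i else pvBsLoop f lo m i := by
  simp only [pvBsLoop, if_pos hlt, hm, hs]

theorem bs_stop (f : Nat) (lo i : Int) : pvBsLoop f lo lo i = lo := by
  cases f <;> simp [pvBsLoop]

-- closed characterization of _gen_of
theorem genOf_eq (i : Int) :
    pvGenOf i =
      (if i < 1 then none else if i ≤ 151 then some "1" else if i ≤ 251 then some "2"
       else if i ≤ 386 then some "3" else if i ≤ 493 then some "4" else if i ≤ 649 then some "5"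
       else if i ≤ 721 then some "6" else if i ≤ 809 then some "7" else if i ≤ 905 then some "8"
       else if i ≤ 1025 then some "9" else none) := by
  simp only [pvGenOf]
  have t1 : pvBsLoop 16 0 9 i = if (494:Int) ≤ i then pvBsLoop 15 5 9 i else pvBsLoop 15 0 4 i :=
    bs_step 15 0 9 i 4 494 (by decide) (by decide) (by decide)
  rw [t1]
  by_cases h494 : (494:Int) ≤ i
  · have t2 : pvBsLoop 15 5 9 i = if (810:Int) ≤ i then pvBsLoop 14 8 9 i else pvBsLoop 14 5 7 i :=
      bs_step 14 5 9 i 7 810 (by decide) (by decide) (by decide)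
    rw [if_pos h494, t2]
    by_cases h810 : (810:Int) ≤ i
    · have t3 : pvBsLoop 14 8 9 i = if (906:Int) ≤ i then pvBsLoop 13 9 9 i else pvBsLoop 13 8 8 i :=
        bs_step 13 8 9 i 8 906 (by decide) (by decide) (by decide)
      rw [if_pos h810, t3]
      by_cases h906 : (906:Int) ≤ i
      · rw [if_pos h906, bs_stop]
        rw [show ((PySem.List.pyGet? pvEnds ((9:Int) - 1)).getD 0) = 1025 from by decide]
        rw [if_neg (show ¬(i < 1) by omega), if_neg (show ¬(i ≤ 151) by omega), if_neg (show ¬(i ≤ 251) by omega), if_neg (show ¬(i ≤ 386) by omega), if_neg (show ¬(i ≤ 493) by omega), if_neg (show ¬(i ≤ 649) by omega), if_neg (show ¬(i ≤ 721) by omega), if_neg (show ¬(i ≤ 809) by omega), if_neg (show ¬(i ≤ 905) by omega)]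
        by_cases hk : i ≤ 1025
        · rw [if_pos hk, if_neg (show ¬((9:Int) = 0 ∨ (1025:Int) < i) by omega)]
          decide
        · rw [if_neg hk, if_pos (show ((9:Int) = 0 ∨ (1025:Int) < i) from Or.inr (by omega))]
      · rw [if_neg h906, bs_stop]
        rw [show ((PySem.List.pyGet? pvEnds ((8:Int) - 1)).getD 0) = 905 from by decide]
        rw [if_neg (show ¬(i < 1) by omega), if_neg (show ¬(i ≤ 151) by omega), if_neg (show ¬(i ≤ 251) by omega), if_neg (show ¬(i ≤ 386) by omega), if_neg (show ¬(i ≤ 493) by omega), if_neg (show ¬(i ≤ 649) by omega), if_neg (show ¬(i ≤ 721) by omega), if_neg (show ¬(i ≤ 809) by omega)]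
        by_cases hk : i ≤ 905
        · rw [if_pos hk, if_neg (show ¬((8:Int) = 0 ∨ (905:Int) < i) by omega)]
          decide
        · exact absurd hk (by omega)
    · have t3 : pvBsLoop 14 5 7 i = if (722:Int) ≤ i then pvBsLoop 13 7 7 i else pvBsLoop 13 5 6 i :=
        bs_step 13 5 7 i 6 722 (by decide) (by decide) (by decide)
      rw [if_neg h810, t3]
      by_cases h722 : (722:Int) ≤ i
      · rw [if_pos h722, bs_stop]
        rw [show ((PySem.List.pyGet? pvEnds ((7:Int) - 1)).getD 0) = 809 from by decide]
        rw [if_neg (show ¬(i < 1) by omega), if_neg (show ¬(i ≤ 151) by omega), if_neg (show ¬(i ≤ 251) by omega), if_neg (show ¬(i ≤ 386) by omega), if_neg (show ¬(i ≤ 493) by omega), if_neg (show ¬(i ≤ 649) by omega), if_neg (show ¬(i ≤ 721) by omega)]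
        by_cases hk : i ≤ 809
        · rw [if_pos hk, if_neg (show ¬((7:Int) = 0 ∨ (809:Int) < i) by omega)]
          decide
        · exact absurd hk (by omega)
      · have t4 : pvBsLoop 13 5 6 i = if (650:Int) ≤ i then pvBsLoop 12 6 6 i else pvBsLoop 12 5 5 i :=
          bs_step 12 5 6 i 5 650 (by decide) (by decide) (by decide)
        rw [if_neg h722, t4]
        by_cases h650 : (650:Int) ≤ i
        · rw [if_pos h650, bs_stop]
          rw [show ((PySem.List.pyGet? pvEnds ((6:Int) - 1)).getD 0) = 721 from by decide]
          rw [if_neg (show ¬(i < 1) by omega), if_neg (show ¬(i ≤ 151) by omega), if_neg (show ¬(i ≤ 251) by omega), if_neg (show ¬(i ≤ 386) by omega), if_neg (show ¬(i ≤ 493) by omega), if_neg (show ¬(i ≤ 649) by omega)]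
          by_cases hk : i ≤ 721
          · rw [if_pos hk, if_neg (show ¬((6:Int) = 0 ∨ (721:Int) < i) by omega)]
            decide
          · exact absurd hk (by omega)
        · rw [if_neg h650, bs_stop]
          rw [show ((PySem.List.pyGet? pvEnds ((5:Int) - 1)).getD 0) = 649 from by decide]
          rw [if_neg (show ¬(i < 1) by omega), if_neg (show ¬(i ≤ 151) by omega), if_neg (show ¬(i ≤ 251) by omega), if_neg (show ¬(i ≤ 386) by omega), if_neg (show ¬(i ≤ 493) by omega)]
          by_cases hk : i ≤ 649
          · rw [if_pos hk, if_neg (show ¬((5:Int) = 0 ∨ (649:Int) < i) by omega)]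
            decide
          · exact absurd hk (by omega)
  · have t2 : pvBsLoop 15 0 4 i = if (252:Int) ≤ i then pvBsLoop 14 3 4 i else pvBsLoop 14 0 2 i :=
      bs_step 14 0 4 i 2 252 (by decide) (by decide) (by decide)
    rw [if_neg h494, t2]
    by_cases h252 : (252:Int) ≤ i
    · have t3 : pvBsLoop 14 3 4 i = if (387:Int) ≤ i then pvBsLoop 13 4 4 i else pvBsLoop 13 3 3 i :=
        bs_step 13 3 4 i 3 387 (by decide) (by decide) (by decide)
      rw [if_pos h252, t3]
      by_cases h387 : (387:Int) ≤ i
      · rw [if_pos h387, bs_stop]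
        rw [show ((PySem.List.pyGet? pvEnds ((4:Int) - 1)).getD 0) = 493 from by decide]
        rw [if_neg (show ¬(i < 1) by omega), if_neg (show ¬(i ≤ 151) by omega), if_neg (show ¬(i ≤ 251) by omega), if_neg (show ¬(i ≤ 386) by omega)]
        by_cases hk : i ≤ 493
        · rw [if_pos hk, if_neg (show ¬((4:Int) = 0 ∨ (493:Int) < i) by omega)]
          decide
        · exact absurd hk (by omega)
      · rw [if_neg h387, bs_stop]
        rw [show ((PySem.List.pyGet? pvEnds ((3:Int) - 1)).getD 0) = 386 from by decide]
        rw [if_neg (show ¬(i < 1) by omega), if_neg (show ¬(i ≤ 151) by omega), if_neg (show ¬(i ≤ 251) by omega)]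
        by_cases hk : i ≤ 386
        · rw [if_pos hk, if_neg (show ¬((3:Int) = 0 ∨ (386:Int) < i) by omega)]
          decide
        · exact absurd hk (by omega)
    · have t3 : pvBsLoop 14 0 2 i = if (152:Int) ≤ i then pvBsLoop 13 2 2 i else pvBsLoop 13 0 1 i :=
        bs_step 13 0 2 i 1 152 (by decide) (by decide) (by decide)
      rw [if_neg h252, t3]
      by_cases h152 : (152:Int) ≤ i
      · rw [if_pos h152, bs_stop]
        rw [show ((PySem.List.pyGet? pvEnds ((2:Int) - 1)).getD 0) = 251 from by decide]
        rw [if_neg (show ¬(i < 1) by omega), if_neg (show ¬(i ≤ 151) by omega)]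
        by_cases hk : i ≤ 251
        · rw [if_pos hk, if_neg (show ¬((2:Int) = 0 ∨ (251:Int) < i) by omega)]
          decide
        · exact absurd hk (by omega)
      · have t4 : pvBsLoop 13 0 1 i = if (1:Int) ≤ i then pvBsLoop 12 1 1 i else pvBsLoop 12 0 0 i :=
          bs_step 12 0 1 i 0 1 (by decide) (by decide) (by decide)
        rw [if_neg h152, t4]
        by_cases h1 : (1:Int) ≤ i
        · rw [if_pos h1, bs_stop]
          rw [show ((PySem.List.pyGet? pvEnds ((1:Int) - 1)).getD 0) = 151 from by decide]
          rw [if_neg (show ¬(i < 1) by omega)]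
          by_cases hk : i ≤ 151
          · rw [if_pos hk, if_neg (show ¬((1:Int) = 0 ∨ (151:Int) < i) by omega)]
            decide
          · exact absurd hk (by omega)
        · rw [if_neg h1, bs_stop]
          rw [show ((PySem.List.pyGet? pvEnds ((0:Int) - 1)).getD 0) = 1025 from by decide]
          rw [if_pos (show ((0:Int) = 0 ∨ (1025:Int) < i) from Or.inl rfl), if_pos (show i < 1 by omega)]

-- lookup in the literal GEN_ID_RANGES dict, as a case tree on the key
theorem key_cases (s : String) :
    pvGenRanges.get? s =
      (if s = "1" then some ((1:Int), (151:Int)) else if s = "2" then some (152, 251)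
       else if s = "3" then some (252, 386) else if s = "4" then some (387, 493)
       else if s = "5" then some (494, 649) else if s = "6" then some (650, 721)
       else if s = "7" then some (722, 809) else if s = "8" then some (810, 905)
       else if s = "9" then some (906, 1025) else none) := by
  by_cases h1 : s = "1"
  · subst h1; decide
  · rw [if_neg h1]
    by_cases h2 : s = "2"
    · subst h2; decide
    · rw [if_neg h2]
      by_cases h3 : s = "3"
      · subst h3; decide
      · rw [if_neg h3]
        by_cases h4 : s = "4"
        · subst h4; decide
        · rw [if_neg h4]
          by_cases h5 : s = "5"
          · subst h5; decide
          · rw [if_neg h5]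
            by_cases h6 : s = "6"
            · subst h6; decide
            · rw [if_neg h6]
              by_cases h7 : s = "7"
              · subst h7; decide
              · rw [if_neg h7]
                by_cases h8 : s = "8"
                · subst h8; decide
                · rw [if_neg h8]
                  by_cases h9 : s = "9"
                  · subst h9; decide
                  · rw [if_neg h9]
                    rw [show pvGenRanges = PySem.Dict.mk [("1", (1, 151)), ("2", (152, 251)), ("3", (252, 386)),
                      ("4", (387, 493)), ("5", (494, 649)), ("6", (650, 721)),
                      ("7", (722, 809)), ("8", (810, 905)), ("9", (906, 1025))] from by decide]
                    simp only [PySem.Dict.get?_mk_cons, beq_iff_eq]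
                    rw [if_neg (fun h => h1 h.symm), if_neg (fun h => h2 h.symm), if_neg (fun h => h3 h.symm), if_neg (fun h => h4 h.symm), if_neg (fun h => h5 h.symm), if_neg (fun h => h6 h.symm), if_neg (fun h => h7 h.symm), if_neg (fun h => h8 h.symm), if_neg (fun h => h9 h.symm)]
                    rfl

-- _gen_of on each region, read off genOf_eq
theorem g0 (i : Int) (h : i < 1) : pvGenOf i = none := by
  rw [genOf_eq, if_pos h]

theorem g1 (i : Int) (ha : 1 ≤ i) (hb : i ≤ 151) : pvGenOf i = some "1" := by
  rw [genOf_eq, if_neg (show ¬(i < 1) by omega), if_pos hb]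

theorem g2 (i : Int) (ha : 152 ≤ i) (hb : i ≤ 251) : pvGenOf i = some "2" := by
  rw [genOf_eq, if_neg (show ¬(i < 1) by omega), if_neg (show ¬(i ≤ 151) by omega), if_pos hb]

theorem g3 (i : Int) (ha : 252 ≤ i) (hb : i ≤ 386) : pvGenOf i = some "3" := by
  rw [genOf_eq, if_neg (show ¬(i < 1) by omega), if_neg (show ¬(i ≤ 151) by omega), if_neg (show ¬(i ≤ 251) by omega), if_pos hb]

theorem g4 (i : Int) (ha : 387 ≤ i) (hb : i ≤ 493) : pvGenOf i = some "4" := by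
  rw [genOf_eq, if_neg (show ¬(i < 1) by omega), if_neg (show ¬(i ≤ 151) by omega), if_neg (show ¬(i ≤ 251) by omega), if_neg (show ¬(i ≤ 386) by omega), if_pos hb]

theorem g5 (i : Int) (ha : 494 ≤ i) (hb : i ≤ 649) : pvGenOf i = some "5" := by
  rw [genOf_eq, if_neg (show ¬(i < 1) by omega), if_neg (show ¬(i ≤ 151) by omega), if_neg (show ¬(i ≤ 251) by omega), if_neg (show ¬(i ≤ 386) by omega), if_neg (show ¬(i ≤ 493) by omega), if_pos hb]

theorem g6 (i : Int) (ha : 650 ≤ i) (hb : i ≤ 721) : pvGenOf i = some "6" := by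
  rw [genOf_eq, if_neg (show ¬(i < 1) by omega), if_neg (show ¬(i ≤ 151) by omega), if_neg (show ¬(i ≤ 251) by omega), if_neg (show ¬(i ≤ 386) by omega), if_neg (show ¬(i ≤ 493) by omega), if_neg (show ¬(i ≤ 649) by omega), if_pos hb]

theorem g7 (i : Int) (ha : 722 ≤ i) (hb : i ≤ 809) : pvGenOf i = some "7" := by
  rw [genOf_eq, if_neg (show ¬(i < 1) by omega), if_neg (show ¬(i ≤ 151) by omega), if_neg (show ¬(i ≤ 251) by omega), if_neg (show ¬(i ≤ 386) by omega), if_neg (show ¬(i ≤ 493) by omega), if_neg (show ¬(i ≤ 649) by omega), if_neg (show ¬(i ≤ 721) by omega), if_pos hb]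

theorem g8 (i : Int) (ha : 810 ≤ i) (hb : i ≤ 905) : pvGenOf i = some "8" := by
  rw [genOf_eq, if_neg (show ¬(i < 1) by omega), if_neg (show ¬(i ≤ 151) by omega), if_neg (show ¬(i ≤ 251) by omega), if_neg (show ¬(i ≤ 386) by omega), if_neg (show ¬(i ≤ 493) by omega), if_neg (show ¬(i ≤ 649) by omega), if_neg (show ¬(i ≤ 721) by omega), if_neg (show ¬(i ≤ 809) by omega), if_pos hb]

theorem g9 (i : Int) (ha : 906 ≤ i) (hb : i ≤ 1025) : pvGenOf i = some "9" := by
  rw [genOf_eq, if_neg (show ¬(i < 1) by omega), if_neg (show ¬(i ≤ 151) by omega), if_neg (show ¬(i ≤ 251) by omega), if_neg (show ¬(i ≤ 386) by omega), if_neg (show ¬(i ≤ 493) by omega), if_neg (show ¬(i ≤ 649) by omega), if_neg (show ¬(i ≤ 721) by omega), if_neg (show ¬(i ≤ 809) by omega), if_neg (show ¬(i ≤ 905) by omega), if_pos hb]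

theorem g10 (i : Int) (h : 1025 < i) : pvGenOf i = none := by
  rw [genOf_eq, if_neg (show ¬(i < 1) by omega), if_neg (show ¬(i ≤ 151) by omega), if_neg (show ¬(i ≤ 251) by omega), if_neg (show ¬(i ≤ 386) by omega), if_neg (show ¬(i ≤ 493) by omega), if_neg (show ¬(i ≤ 649) by omega), if_neg (show ¬(i ≤ 721) by omega), if_neg (show ¬(i ≤ 809) by omega), if_neg (show ¬(i ≤ 905) by omega), if_neg (show ¬(i ≤ 1025) by omega)]

-- _gen_of hits some "k" only on generation k's range
theorem genOf_inj (i : Int) (s : String) (h : pvGenOf i = some s) :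
    (s = "1" ∧ 1 ≤ i ∧ i ≤ 151) ∨ (s = "2" ∧ 152 ≤ i ∧ i ≤ 251) ∨ (s = "3" ∧ 252 ≤ i ∧ i ≤ 386) ∨ (s = "4" ∧ 387 ≤ i ∧ i ≤ 493) ∨ (s = "5" ∧ 494 ≤ i ∧ i ≤ 649) ∨ (s = "6" ∧ 650 ≤ i ∧ i ≤ 721) ∨ (s = "7" ∧ 722 ≤ i ∧ i ≤ 809) ∨ (s = "8" ∧ 810 ≤ i ∧ i ≤ 905) ∨ (s = "9" ∧ 906 ≤ i ∧ i ≤ 1025) := by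
  by_cases c0 : i < 1
  · rw [g0 i c0] at h; cases h
  by_cases c1 : i ≤ 151
  · rw [g1 i (by omega) c1] at h
    cases h
    exact (Or.inl ⟨rfl, by omega, by omega⟩)
  by_cases c2 : i ≤ 251
  · rw [g2 i (by omega) c2] at h
    cases h
    exact (Or.inr (Or.inl ⟨rfl, by omega, by omega⟩))
  by_cases c3 : i ≤ 386
  · rw [g3 i (by omega) c3] at h
    cases h
    exact (Or.inr (Or.inr (Or.inl ⟨rfl, by omega, by omega⟩)))
  by_cases c4 : i ≤ 493
  · rw [g4 i (by omega) c4] at h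
    cases h
    exact (Or.inr (Or.inr (Or.inr (Or.inl ⟨rfl, by omega, by omega⟩))))
  by_cases c5 : i ≤ 649
  · rw [g5 i (by omega) c5] at h
    cases h
    exact (Or.inr (Or.inr (Or.inr (Or.inr (Or.inl ⟨rfl, by omega, by omega⟩)))))
  by_cases c6 : i ≤ 721
  · rw [g6 i (by omega) c6] at h
    cases h
    exact (Or.inr (Or.inr (Or.inr (Or.inr (Or.inr (Or.inl ⟨rfl, by omega, by omega⟩))))))
  by_cases c7 : i ≤ 809
  · rw [g7 i (by omega) c7] at h
    cases h
    exact (Or.inr (Or.inr (Or.inr (Or.inr (Or.inr (Or.inr (Or.inl ⟨rfl, by omega, by omega⟩)))))))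
  by_cases c8 : i ≤ 905
  · rw [g8 i (by omega) c8] at h
    cases h
    exact (Or.inr (Or.inr (Or.inr (Or.inr (Or.inr (Or.inr (Or.inr (Or.inl ⟨rfl, by omega, by omega⟩))))))))
  by_cases c9 : i ≤ 1025
  · rw [g9 i (by omega) c9] at h
    cases h
    exact (Or.inr (Or.inr (Or.inr (Or.inr (Or.inr (Or.inr (Or.inr (Or.inr ⟨rfl, by omega, by omega⟩))))))))
  rw [g10 i (by omega)] at h; cases h

-- recognized key + its range bounds ⟺ _gen_of lands on that key
theorem range_iff (s : String) (r : Int × Int) (h : pvGenRanges.get? s = some r) (i : Int) :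
    (r.1 ≤ i ∧ i ≤ r.2) ↔ pvGenOf i = some s := by
  by_cases h1 : s = "1"
  · subst h1
    rw [show pvGenRanges.get? "1" = some ((1:Int), (151:Int)) from by decide] at h
    cases h
    constructor
    · rintro ⟨ha, hb⟩; exact g1 i ha hb
    · intro hg
      rcases genOf_inj i _ hg with ⟨hs, ha, hb⟩|⟨hs, ha, hb⟩|⟨hs, ha, hb⟩|⟨hs, ha, hb⟩|⟨hs, ha, hb⟩|⟨hs, ha, hb⟩|⟨hs, ha, hb⟩|⟨hs, ha, hb⟩|⟨hs, ha, hb⟩ <;>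
        first | exact absurd hs (by decide) | exact ⟨ha, hb⟩
  ·
    by_cases h2 : s = "2"
    · subst h2
      rw [show pvGenRanges.get? "2" = some ((152:Int), (251:Int)) from by decide] at h
      cases h
      constructor
      · rintro ⟨ha, hb⟩; exact g2 i ha hb
      · intro hg
        rcases genOf_inj i _ hg with ⟨hs, ha, hb⟩|⟨hs, ha, hb⟩|⟨hs, ha, hb⟩|⟨hs, ha, hb⟩|⟨hs, ha, hb⟩|⟨hs, ha, hb⟩|⟨hs, ha, hb⟩|⟨hs, ha, hb⟩|⟨hs, ha, hb⟩ <;>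
          first | exact absurd hs (by decide) | exact ⟨ha, hb⟩
    ·
      by_cases h3 : s = "3"
      · subst h3
        rw [show pvGenRanges.get? "3" = some ((252:Int), (386:Int)) from by decide] at h
        cases h
        constructor
        · rintro ⟨ha, hb⟩; exact g3 i ha hb
        · intro hg
          rcases genOf_inj i _ hg with ⟨hs, ha, hb⟩|⟨hs, ha, hb⟩|⟨hs, ha, hb⟩|⟨hs, ha, hb⟩|⟨hs, ha, hb⟩|⟨hs, ha, hb⟩|⟨hs, ha, hb⟩|⟨hs, ha, hb⟩|⟨hs, ha, hb⟩ <;>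
            first | exact absurd hs (by decide) | exact ⟨ha, hb⟩
      ·
        by_cases h4 : s = "4"
        · subst h4
          rw [show pvGenRanges.get? "4" = some ((387:Int), (493:Int)) from by decide] at h
          cases h
          constructor
          · rintro ⟨ha, hb⟩; exact g4 i ha hb
          · intro hg
            rcases genOf_inj i _ hg with ⟨hs, ha, hb⟩|⟨hs, ha, hb⟩|⟨hs, ha, hb⟩|⟨hs, ha, hb⟩|⟨hs, ha, hb⟩|⟨hs, ha, hb⟩|⟨hs, ha, hb⟩|⟨hs, ha, hb⟩|⟨hs, ha, hb⟩ <;>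
              first | exact absurd hs (by decide) | exact ⟨ha, hb⟩
        ·
          by_cases h5 : s = "5"
          · subst h5
            rw [show pvGenRanges.get? "5" = some ((494:Int), (649:Int)) from by decide] at h
            cases h
            constructor
            · rintro ⟨ha, hb⟩; exact g5 i ha hb
            · intro hg
              rcases genOf_inj i _ hg with ⟨hs, ha, hb⟩|⟨hs, ha, hb⟩|⟨hs, ha, hb⟩|⟨hs, ha, hb⟩|⟨hs, ha, hb⟩|⟨hs, ha, hb⟩|⟨hs, ha, hb⟩|⟨hs, ha, hb⟩|⟨hs, ha, hb⟩ <;>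
                first | exact absurd hs (by decide) | exact ⟨ha, hb⟩
          ·
            by_cases h6 : s = "6"
            · subst h6
              rw [show pvGenRanges.get? "6" = some ((650:Int), (721:Int)) from by decide] at h
              cases h
              constructor
              · rintro ⟨ha, hb⟩; exact g6 i ha hb
              · intro hg
                rcases genOf_inj i _ hg with ⟨hs, ha, hb⟩|⟨hs, ha, hb⟩|⟨hs, ha, hb⟩|⟨hs, ha, hb⟩|⟨hs, ha, hb⟩|⟨hs, ha, hb⟩|⟨hs, ha, hb⟩|⟨hs, ha, hb⟩|⟨hs, ha, hb⟩ <;>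
                  first | exact absurd hs (by decide) | exact ⟨ha, hb⟩
            ·
              by_cases h7 : s = "7"
              · subst h7
                rw [show pvGenRanges.get? "7" = some ((722:Int), (809:Int)) from by decide] at h
                cases h
                constructor
                · rintro ⟨ha, hb⟩; exact g7 i ha hb
                · intro hg
                  rcases genOf_inj i _ hg with ⟨hs, ha, hb⟩|⟨hs, ha, hb⟩|⟨hs, ha, hb⟩|⟨hs, ha, hb⟩|⟨hs, ha, hb⟩|⟨hs, ha, hb⟩|⟨hs, ha, hb⟩|⟨hs, ha, hb⟩|⟨hs, ha, hb⟩ <;>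
                    first | exact absurd hs (by decide) | exact ⟨ha, hb⟩
              ·
                by_cases h8 : s = "8"
                · subst h8
                  rw [show pvGenRanges.get? "8" = some ((810:Int), (905:Int)) from by decide] at h
                  cases h
                  constructor
                  · rintro ⟨ha, hb⟩; exact g8 i ha hb
                  · intro hg
                    rcases genOf_inj i _ hg with ⟨hs, ha, hb⟩|⟨hs, ha, hb⟩|⟨hs, ha, hb⟩|⟨hs, ha, hb⟩|⟨hs, ha, hb⟩|⟨hs, ha, hb⟩|⟨hs, ha, hb⟩|⟨hs, ha, hb⟩|⟨hs, ha, hb⟩ <;>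
                      first | exact absurd hs (by decide) | exact ⟨ha, hb⟩
                ·
                  by_cases h9 : s = "9"
                  · subst h9
                    rw [show pvGenRanges.get? "9" = some ((906:Int), (1025:Int)) from by decide] at h
                    cases h
                    constructor
                    · rintro ⟨ha, hb⟩; exact g9 i ha hb
                    · intro hg
                      rcases genOf_inj i _ hg with ⟨hs, ha, hb⟩|⟨hs, ha, hb⟩|⟨hs, ha, hb⟩|⟨hs, ha, hb⟩|⟨hs, ha, hb⟩|⟨hs, ha, hb⟩|⟨hs, ha, hb⟩|⟨hs, ha, hb⟩|⟨hs, ha, hb⟩ <;>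
                        first | exact absurd hs (by decide) | exact ⟨ha, hb⟩
                  · rw [key_cases] at h
                    rw [if_neg h1, if_neg h2, if_neg h3, if_neg h4, if_neg h5, if_neg h6, if_neg h7,
                      if_neg h8, if_neg h9] at h
                    cases h

theorem key_of_get? (s : String) (r : Int × Int) (h : pvGenRanges.get? s = some r) :
    s ∈ PySem.Dict.keys pvGenRanges := by
  rw [key_cases] at h
  rw [show PySem.Dict.keys pvGenRanges = ["1","2","3","4","5","6","7","8","9"] from by decide]
  by_cases h1 : s = "1"
  · subst h1; decide
  · rw [if_neg h1] at h
    by_cases h2 : s = "2"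
    · subst h2; decide
    · rw [if_neg h2] at h
      by_cases h3 : s = "3"
      · subst h3; decide
      · rw [if_neg h3] at h
        by_cases h4 : s = "4"
        · subst h4; decide
        · rw [if_neg h4] at h
          by_cases h5 : s = "5"
          · subst h5; decide
          · rw [if_neg h5] at h
            by_cases h6 : s = "6"
            · subst h6; decide
            · rw [if_neg h6] at h
              by_cases h7 : s = "7"
              · subst h7; decide
              · rw [if_neg h7] at h
                by_cases h8 : s = "8"
                · subst h8; decide
                · rw [if_neg h8] at h
                  by_cases h9 : s = "9"
                  · subst h9; decide
                  · rw [if_neg h9] at h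
                    cases h

theorem get?_of_key (s : String) (h : s ∈ PySem.Dict.keys pvGenRanges) :
    ∃ r, pvGenRanges.get? s = some r := by
  rw [show PySem.Dict.keys pvGenRanges = ["1","2","3","4","5","6","7","8","9"] from by decide] at h
  fin_cases h
  · exact ⟨(1, 151), by decide⟩
  · exact ⟨(152, 251), by decide⟩
  · exact ⟨(252, 386), by decide⟩
  · exact ⟨(387, 493), by decide⟩
  · exact ⟨(494, 649), by decide⟩
  · exact ⟨(650, 721), by decide⟩
  · exact ⟨(722, 809), by decide⟩
  · exact ⟨(810, 905), by decide⟩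
  · exact ⟨(906, 1025), by decide⟩

-- membership in A's recognized ranges list
theorem mem_parseRanges (g : String) (r : Int × Int) :
    r ∈ pvParseRanges g ↔ ∃ s ∈ (pvSplit g).map PySem.Str.strip, pvGenRanges.get? s = some r := by
  simp only [pvParseRanges, List.mem_filterMap, List.mem_map, List.mem_filter, id,
    decide_eq_true_eq]
  constructor
  · rintro ⟨o, ⟨s, ⟨hs, -⟩, rfl⟩, ho⟩
    exact ⟨s, hs, ho⟩
  · rintro ⟨s, hs, h⟩
    refine ⟨some r, ⟨s, ⟨hs, ?_⟩, h⟩, rfl⟩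
    rintro rfl
    rw [key_cases] at h
    simp at h

-- the per-id predicates of the two ports agree
theorem pred_eq (g : String) (i : Int) :
    ((pvParseRanges g).any (fun r => decide (r.1 ≤ i) && decide (i ≤ r.2))) =
    (match pvGenOf i with
     | none => false
     | some s => PySem.Set.contains
         (PySem.Set.inter (PySem.Set.ofList ((pvSplit g).map PySem.Str.strip))
           (PySem.Set.ofList (PySem.Dict.keys pvGenRanges))) s) := by
  rw [Bool.eq_iff_iff]
  simp only [List.any_eq_true, Bool.and_eq_true, decide_eq_true_eq]
  cases hgo : pvGenOf i with
  | none =>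
    simp only [Bool.false_eq_true, iff_false]
    rintro ⟨r, hr, h1, h2⟩
    obtain ⟨s, -, hget⟩ := (mem_parseRanges g r).mp hr
    rw [(range_iff s r hget i).mp ⟨h1, h2⟩] at hgo
    cases hgo
  | some s =>
    simp only [PySem.Set.contains_eq_listContains, List.contains_iff_mem,
      PySem.Set.mem_inter, PySem.Set.mem_ofList]
    constructor
    · rintro ⟨r, hr, h1, h2⟩
      obtain ⟨s', hs', hget⟩ := (mem_parseRanges g r).mp hr
      have : pvGenOf i = some s' := (range_iff s' r hget i).mp ⟨h1, h2⟩
      rw [hgo] at this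
      cases this
      exact ⟨hs', key_of_get? _ r hget⟩
    · rintro ⟨hs, hk⟩
      obtain ⟨r, hget⟩ := get?_of_key s hk
      obtain ⟨h1, h2⟩ := (range_iff s r hget i).mpr hgo
      exact ⟨r, (mem_parseRanges g r).mpr ⟨s, hs, hget⟩, h1, h2⟩

-- emptiness of A's ranges list ⟺ emptiness of B's selected set
theorem ranges_empty_iff (g : String) :
    (pvParseRanges g = []) ↔
    (PySem.Set.inter (PySem.Set.ofList ((pvSplit g).map PySem.Str.strip))
      (PySem.Set.ofList (PySem.Dict.keys pvGenRanges)) = []) := by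
  rw [List.eq_nil_iff_forall_not_mem, List.eq_nil_iff_forall_not_mem]
  constructor
  · intro h s hs
    rw [PySem.Set.mem_inter, PySem.Set.mem_ofList, PySem.Set.mem_ofList] at hs
    obtain ⟨hmem, hkey⟩ := hs
    obtain ⟨r, hget⟩ := get?_of_key s hkey
    exact h r ((mem_parseRanges g r).mpr ⟨s, hmem, hget⟩)
  · intro h r hr
    obtain ⟨s, hs, hget⟩ := (mem_parseRanges g r).mp hr
    refine h s ?_
    rw [PySem.Set.mem_inter, PySem.Set.mem_ofList, PySem.Set.mem_ofList]
    exact ⟨hs, key_of_get? s r hget⟩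

-- membership in the inner fold of A's allowed-set build
theorem mem_inner_fold (ids : List Int) (p : Int → Prop) [DecidablePred p]
    (acc : PySem.Set Int) (y : Int) :
    y ∈ ids.foldl (fun acc i => if p i then PySem.Set.add acc i else acc) acc ↔
      y ∈ acc ∨ (y ∈ ids ∧ p y) := by
  induction ids generalizing acc with
  | nil => simp
  | cons x xs ih =>
    simp only [List.foldl_cons, ih]
    by_cases hx : p x
    · simp [hx, PySem.Set.mem_add]
      constructor
      · rintro ((h | rfl) | h)
        · exact Or.inl h
        · exact Or.inr ⟨Or.inl rfl, hx⟩
        · exact Or.inr ⟨Or.inr h.1, h.2⟩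
      · rintro (h | ⟨(rfl | h), hp⟩)
        · exact Or.inl (Or.inl h)
        · exact Or.inl (Or.inr rfl)
        · exact Or.inr ⟨h, hp⟩
    · simp [hx, List.mem_cons]
      constructor
      · rintro (h | h)
        · exact Or.inl h
        · exact Or.inr ⟨Or.inr h.1, h.2⟩
      · rintro (h | ⟨(rfl | h), hp⟩)
        · exact Or.inl h
        · exact absurd hp hx
        · exact Or.inr ⟨h, hp⟩

theorem mem_allowed (ids : List Int) (ranges : List (Int × Int)) (y : Int) :
    y ∈ ranges.foldl (fun acc r =>
        ids.foldl (fun acc i =>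
          if r.1 ≤ i ∧ i ≤ r.2 then PySem.Set.add acc i else acc) acc) PySem.Set.empty ↔
      y ∈ ids ∧ ∃ r ∈ ranges, r.1 ≤ y ∧ y ≤ r.2 := by
  suffices h : ∀ acc : PySem.Set Int,
      y ∈ ranges.foldl (fun acc r =>
        ids.foldl (fun acc i =>
          if r.1 ≤ i ∧ i ≤ r.2 then PySem.Set.add acc i else acc) acc) acc ↔
      y ∈ acc ∨ (y ∈ ids ∧ ∃ r ∈ ranges, r.1 ≤ y ∧ y ≤ r.2) by
    simpa [PySem.Set.empty] using h PySem.Set.empty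
  induction ranges with
  | nil => simp
  | cons r rs ih =>
    intro acc
    simp only [List.foldl_cons, ih, mem_inner_fold]
    constructor
    · rintro ((h | ⟨hm, hr⟩) | ⟨hm, rr, hrr, hb⟩)
      · exact Or.inl h
      · exact Or.inr ⟨hm, r, List.mem_cons_self .., hr⟩
      · exact Or.inr ⟨hm, rr, List.mem_cons_of_mem _ hrr, hb⟩
    · rintro (h | ⟨hm, rr, hrr, hb⟩)
      · exact Or.inl (Or.inl h)
      · rcases List.mem_cons.mp hrr with rfl | hrr
        · exact Or.inl (Or.inr ⟨hm, hb⟩)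
        · exact Or.inr ⟨hm, rr, hrr, hb⟩

theorem filter_congr_allowed (ids : List Int) (ranges : List (Int × Int)) :
    ids.filter (fun i => PySem.Set.contains
      (ranges.foldl (fun acc r =>
        ids.foldl (fun acc i =>
          if r.1 ≤ i ∧ i ≤ r.2 then PySem.Set.add acc i else acc) acc) PySem.Set.empty) i) =
    ids.filter (fun i => ranges.any (fun r => decide (r.1 ≤ i) && decide (i ≤ r.2))) := by
  apply List.filter_congr
  intro x hx
  rw [Bool.eq_iff_iff]
  simp only [PySem.Set.contains_eq_listContains, List.contains_iff_mem, List.any_eq_true,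
    Bool.and_eq_true, decide_eq_true_eq, mem_allowed]
  constructor
  · rintro ⟨_, r, hr, h1, h2⟩; exact ⟨r, hr, h1, h2⟩
  · rintro ⟨r, hr, h1, h2⟩; exact ⟨hx, r, hr, h1, h2⟩

theorem allowed_empty_iff (ids : List Int) (ranges : List (Int × Int)) :
    (ranges.foldl (fun acc r =>
        ids.foldl (fun acc i =>
          if r.1 ≤ i ∧ i ≤ r.2 then PySem.Set.add acc i else acc) acc) PySem.Set.empty = []) ↔
    (ids.filter (fun i => ranges.any (fun r => decide (r.1 ≤ i) && decide (i ≤ r.2))) = []) := by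
  rw [List.eq_nil_iff_forall_not_mem, List.filter_eq_nil_iff]
  constructor
  · intro h x hx hb
    simp only [List.any_eq_true, Bool.and_eq_true, decide_eq_true_eq] at hb
    obtain ⟨r, hr, h1, h2⟩ := hb
    exact h x ((mem_allowed ids ranges x).mpr ⟨hx, r, hr, h1, h2⟩)
  · intro h x hx
    obtain ⟨hxi, r, hr, h1, h2⟩ := (mem_allowed ids ranges x).mp hx
    refine h x hxi ?_
    simp only [List.any_eq_true, Bool.and_eq_true, decide_eq_true_eq]
    exact ⟨r, hr, h1, h2⟩

-- A's filter over the allowed set = B's filter by generation lookup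
theorem filter_eq_filter (ids : List Int) (g : String) :
    ids.filter (fun i => (pvParseRanges g).any (fun r => decide (r.1 ≤ i) && decide (i ≤ r.2))) =
    ids.filter (fun i =>
      match pvGenOf i with
      | none => false
      | some s => PySem.Set.contains
          (PySem.Set.inter (PySem.Set.ofList ((pvSplit g).map PySem.Str.strip))
            (PySem.Set.ofList (PySem.Dict.keys pvGenRanges))) s) := by
  apply List.filter_congr
  intro x _
  exact pred_eq g x

-- ===== VERDICT (by name: the statement is the Claim_ definition above) =====
theorem filter_ids_by_gen_py_spec : Claim_equal_filter_ids_by_gen_py := by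
  intro ids gen _
  unfold Spec_filter_ids_by_gen_py filter_ids_by_gen_py filter_ids_by_gen_py_alt
  cases gen with
  | none => rfl
  | some gs =>
    simp only []
    split_ifs with h1 h2 h3 h4 h5 h6 h7 h8 h9 h10
    · rfl
    · rfl
    · rfl
    · exact absurd ((ranges_empty_iff _).mp h3) h4
    · exact absurd ((ranges_empty_iff _).mp h3) h4
    · rfl
    · rfl
    · exact absurd ((filter_eq_filter ids _).symm.trans ((allowed_empty_iff ids _).mp h6)) h8
    · exact absurd ((ranges_empty_iff _).mpr h9) h3
    · exact absurd ((allowed_empty_iff ids _).mpr ((filter_eq_filter ids _).trans h10)) h6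
    · exact (filter_congr_allowed ids _).trans (filter_eq_filter ids _)
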